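-- pv_equiv track=rewrite | github.com/jscode90/bug-finder | main.py | bug_count_test
-- ===== SOURCE A (Python) =====
-- def bug_check(bug_char,test_char):
--     """Logic that compares two characters, white spaces are ignored
--     returns True or False"""
--     check_result = False
--     if bug_char == test_char or bug_char.isspace():
--         check_result = True
--     return check_result
--
-- def bug_sample_check(bug,test_sample):
--     """Checks if the bug array and the sample array from the test
--     are identical (ignoring white spaces of the bug)
--     returns a list with True or False for each character check done"""
--     sample_check = []
--     for i in range(0,len(bug)):
--         for j in range(0,len(bug[i])):
--             sample_check.append(bug_check(bug[i][j],test_sample[i][j]))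
--     return sample_check
--
-- def sample_test(i,j,test_content,y_bug_size,x_bug_size):
--     """Creates a squared bug-sized array from the test content matrix
--     at position i and j, returns the test sample as a nested list"""
--     test_sample = []
--     for a in range(i,i+y_bug_size):
--         row = []
--         for b in range(j,j+x_bug_size):
--             row.append(test_content[a][b])
--         test_sample.append(row)
--     return test_sample
--
-- def bug_count_test(bug_content,test_content):
--     """Checks the numbers of bugs found in the test file
--     returns it as an int value"""
--
--     #Definition of bug size
--     y_bug_size = len(bug_content)
--     x_bug_size = len(bug_content[0])
--
--     #Definition of number of possible checks in horizontal and vertical direction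
--     ver_size = len(test_content)-len(bug_content)
--     hor_size = len(test_content[0])-len(bug_content[0])
--
--     #Check count
--     check_count = 0
--     for i in range(0,ver_size+1):
--         for j in range(0,hor_size+1):
--             #Creation of test sample for position i and j from the content
--             test_sample = sample_test(i,j,test_content,y_bug_size,x_bug_size)
--
--             #Comparison of bug with test sample
--             final_check = bug_sample_check(bug_content, test_sample)
--
--             #If all checks are truthful, a bug was found
--             if all(final_check):
--                 check_count += 1
--
--     return check_count
-- ===== SOURCE B (Python) =====
-- def bug_count_test(bug_content, test_content):
--     """Counts bug occurrences by precompiling the bug into a sparse list of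
--     non-space (row, col, char) constraints, then checking each window with
--     early exit -- no per-window sample/check lists are materialized."""
--     constraints = [(di, dj, ch)
--                    for di, row in enumerate(bug_content)
--                    for dj, ch in enumerate(row)
--                    if not ch.isspace()]
--     ver = len(test_content) - len(bug_content)
--     hor = len(test_content[0]) - len(bug_content[0])
--     count = 0
--     for i in range(ver + 1):
--         for j in range(hor + 1):
--             if all(test_content[i + di][j + dj] == ch for di, dj, ch in constraints):
--                 count += 1
--     return count
-- ===== Notes on version B (the rewrite author's own statement) =====
-- stated objective: alternative
-- what changed: B precompiles the bug once into a sparse list of non-space (row,col,char) constraints and checks each window by direct indexing with early exit, instead of materializing a bug-sized sample matrix and a full boolean check-list for every window.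
-- outside the precondition, e.g. on bug_count_test([[]], [['a'], []]): A returns 4, B returns 4
import Mathlib
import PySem

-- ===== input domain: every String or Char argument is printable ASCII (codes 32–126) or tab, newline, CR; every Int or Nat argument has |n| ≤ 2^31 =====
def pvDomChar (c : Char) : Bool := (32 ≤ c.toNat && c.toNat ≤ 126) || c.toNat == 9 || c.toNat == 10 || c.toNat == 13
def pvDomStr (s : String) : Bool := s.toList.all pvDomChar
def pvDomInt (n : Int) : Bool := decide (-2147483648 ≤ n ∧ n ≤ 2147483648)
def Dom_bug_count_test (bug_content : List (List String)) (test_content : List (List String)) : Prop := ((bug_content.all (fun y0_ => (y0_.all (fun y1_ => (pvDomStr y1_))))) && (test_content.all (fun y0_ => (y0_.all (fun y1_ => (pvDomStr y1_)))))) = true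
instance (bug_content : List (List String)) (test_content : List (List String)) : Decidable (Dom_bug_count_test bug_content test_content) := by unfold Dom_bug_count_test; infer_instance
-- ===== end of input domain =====

-- B replaces A's per-window sample/check-list materialization by a sparse list of non-space
-- (row, col, char) constraints compiled once, checked per window with early exit (objective: alternative).

-- ===== PORT A =====
def bug_check (bug_char test_char : String) : Bool :=
  let check_result := false
  let check_result := if bug_char == test_char || PySem.Str.strIsspace bug_char then true else check_result
  check_result

def bug_sample_check (bug test_sample : List (List String)) : List Bool :=
  (PySem.List.pyRange 0 (PySem.List.len bug)).foldl (fun sc i =>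
    (PySem.List.pyRange 0 (PySem.List.len (PySem.List.pyGetD bug i []))).foldl (fun sc2 j =>
      sc2 ++ [bug_check (PySem.List.pyGetD (PySem.List.pyGetD bug i []) j "")
                        (PySem.List.pyGetD (PySem.List.pyGetD test_sample i []) j "")]) sc) []

def sample_test (i j : Int) (test_content : List (List String)) (y_bug_size x_bug_size : Int) : List (List String) :=
  (PySem.List.pyRange i (i + y_bug_size)).foldl (fun ts a =>
    ts ++ [(PySem.List.pyRange j (j + x_bug_size)).foldl (fun row b =>
      row ++ [PySem.List.pyGetD (PySem.List.pyGetD test_content a []) b ""]) []]) []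

def bug_count_test (bug_content : List (List String)) (test_content : List (List String)) : Int :=
  let y_bug_size := PySem.List.len bug_content
  let x_bug_size := PySem.List.len (PySem.List.pyGetD bug_content 0 [])
  let ver_size := PySem.List.len test_content - PySem.List.len bug_content
  let hor_size := PySem.List.len (PySem.List.pyGetD test_content 0 []) - PySem.List.len (PySem.List.pyGetD bug_content 0 [])
  (PySem.List.pyRange 0 (ver_size + 1)).foldl (fun cc i =>
    (PySem.List.pyRange 0 (hor_size + 1)).foldl (fun cc2 j =>
      let test_sample := sample_test i j test_content y_bug_size x_bug_size
      let final_check := bug_sample_check bug_content test_sample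
      if final_check.all (fun r => r) then cc2 + 1 else cc2) cc) 0

-- ===== PORT B =====
-- the sparse constraint list: (row, col, char) for every non-space bug cell
def pv_constraints (bug_content : List (List String)) : List (Int × Int × String) :=
  (PySem.List.enumerate bug_content).flatMap (fun pr =>
    (PySem.List.enumerate pr.2).filterMap (fun qc =>
      if PySem.Str.strIsspace qc.2 then none else some (pr.1, qc.1, qc.2)))

def bug_count_test_alt (bug_content : List (List String)) (test_content : List (List String)) : Int :=
  let constraints := pv_constraints bug_content
  let ver := PySem.List.len test_content - PySem.List.len bug_content
  let hor := PySem.List.len (PySem.List.pyGetD test_content 0 []) - PySem.List.len (PySem.List.pyGetD bug_content 0 [])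
  (PySem.List.pyRange 0 (ver + 1)).foldl (fun cnt i =>
    (PySem.List.pyRange 0 (hor + 1)).foldl (fun cnt2 j =>
      if constraints.all (fun c =>
          PySem.List.pyGetD (PySem.List.pyGetD test_content (i + c.1) []) (j + c.2.1) "" == c.2.2)
      then cnt2 + 1 else cnt2) cnt) 0

-- ===== PRECONDITION & SPEC =====
-- Pre_ excludes empty grids (A raises IndexError on bug_content[0] / test_content[0]) and ragged rows that A's
-- window scan would index past (IndexError); still admitted are bug rows shorter than the first, test rows longer
-- than the first (never read past the first row's width), and ragged grids whose window ranges are empty (bug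
-- taller or wider than the test); a few ragged corners where A reads no cell and returns (e.g. an empty bug row
-- with a ragged test) are excluded although A returns — B returns the same value there.
def Pre_bug_count_test (bug_content : List (List String)) (test_content : List (List String)) : Prop :=
  bug_content ≠ [] ∧ test_content ≠ [] ∧
    (((∀ r ∈ bug_content, r.length ≤ (bug_content.getD 0 []).length) ∧
      (∀ r ∈ test_content, (test_content.getD 0 []).length ≤ r.length)) ∨
     test_content.length < bug_content.length ∨
     (test_content.getD 0 []).length < (bug_content.getD 0 []).length)
instance (bug_content : List (List String)) (test_content : List (List String)) : Decidable (Pre_bug_count_test bug_content test_content) := by unfold Pre_bug_count_test; infer_instance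

def pvWitness_bug_count_test : List (List String) × List (List String) :=
  ([[" ", "a"]], [["a", "a"], ["b", "a"]])

def Spec_bug_count_test (bug_content : List (List String)) (test_content : List (List String)) (out : Int) : Prop := out = bug_count_test_alt bug_content test_content
instance (bug_content : List (List String)) (test_content : List (List String)) (out : Int) : Decidable (Spec_bug_count_test bug_content test_content out) := by unfold Spec_bug_count_test; infer_instance

-- ===== CLAIM (what is proved, stated in full; the proofs are below) =====
def Claim_equal_bug_count_test : Prop := ∀ (bug_content : List (List String)) (test_content : List (List String)), Dom_bug_count_test bug_content test_content → Pre_bug_count_test bug_content test_content → Spec_bug_count_test bug_content test_content (bug_count_test bug_content test_content)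

-- ===== LEMMAS AND PROOFS =====

-- the test cell a window comparison reads (with the ports' total defaults)
def pvCell (test_content : List (List String)) (a b : Int) : String :=
  PySem.List.pyGetD (PySem.List.pyGetD test_content a []) b ""

lemma sample_test_eq (i j : Int) (test_content : List (List String)) (y x : Nat) :
    sample_test i j test_content (y : Int) (x : Int) =
      (PySem.List.pyRange i (i + (y : Int))).map (fun a =>
        (PySem.List.pyRange j (j + (x : Int))).map (fun b => pvCell test_content a b)) := by
  unfold sample_test pvCell
  simp only [PySem.List.foldl_append_singleton_eq_map, List.nil_append]

lemma bug_sample_check_eq (bug ts : List (List String)) :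
    bug_sample_check bug ts =
      (PySem.List.pyRange 0 (PySem.List.len bug)).flatMap (fun p =>
        (PySem.List.pyRange 0 (PySem.List.len (PySem.List.pyGetD bug p []))).map (fun q =>
          bug_check (PySem.List.pyGetD (PySem.List.pyGetD bug p []) q "")
                    (PySem.List.pyGetD (PySem.List.pyGetD ts p []) q ""))) := by
  unfold bug_sample_check
  simp only [PySem.List.foldl_append_singleton_eq_map, PySem.List.foldl_append_eq_flatMap,
    List.nil_append]


lemma bug_check_eq (b t : String) : bug_check b t = (b == t || PySem.Str.strIsspace b) := by
  unfold bug_check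
  split <;> simp_all

lemma bug_check_iff (b t : String) :
    bug_check b t = true ↔ (PySem.Str.strIsspace b = false → (t == b) = true) := by
  rw [bug_check_eq, BEq.comm]
  cases hs : PySem.Str.strIsspace b <;> simp_all

lemma mem_constraints (bug : List (List String)) (c : Int × Int × String) :
    c ∈ pv_constraints bug ↔
      ∃ (p : Nat) (hp : p < bug.length) (q : Nat) (hq : q < (bug[p]'hp).length),
        PySem.Str.strIsspace ((bug[p]'hp)[q]'hq) = false ∧
        c = ((p : Int), (q : Int), (bug[p]'hp)[q]'hq) := by
  unfold pv_constraints
  simp only [List.mem_flatMap, List.mem_filterMap, PySem.List.mem_enumerate_iff, zero_add]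
  constructor
  · rintro ⟨pr, ⟨p, hp, rfl⟩, qc, ⟨q, hq, rfl⟩, hsome⟩
    by_cases hs : PySem.Str.strIsspace (bug[p][q]) = true
    · rw [if_pos hs] at hsome
      exact absurd hsome (by simp)
    · have hs' : PySem.Str.strIsspace (bug[p][q]) = false := by simpa using hs
      rw [if_neg hs] at hsome
      exact ⟨p, hp, q, hq, hs', (Option.some.inj hsome).symm⟩
  · rintro ⟨p, hp, q, hq, hs, rfl⟩
    refine ⟨(↑p, bug[p]), ⟨p, hp, rfl⟩, (↑q, bug[p][q]), ⟨q, hq, rfl⟩, ?_⟩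
    rw [if_neg (by rw [hs]; simp)]

lemma window_eq (bug test : List (List String))
    (hbug : ∀ r ∈ bug, r.length ≤ (bug.getD 0 []).length) (i j : Int) :
    (bug_sample_check bug
        (sample_test i j test (bug.length : Int) ((bug.getD 0 []).length : Int))).all (fun r => r)
    = (pv_constraints bug).all (fun c =>
        PySem.List.pyGetD (PySem.List.pyGetD test (i + c.1) []) (j + c.2.1) "" == c.2.2) := by
  rw [Bool.eq_iff_iff, bug_sample_check_eq, sample_test_eq]
  simp only [List.all_flatMap, List.all_map, Function.comp_def, List.all_eq_true,
    PySem.List.mem_pyRange_one, PySem.List.len_eq]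
  constructor
  · intro h c hc
    obtain ⟨p, hp, q, hq, hs, rfl⟩ := (mem_constraints bug c).mp hc
    have hqW : q < (bug.getD 0 []).length :=
      lt_of_lt_of_le hq (hbug _ (List.getElem_mem hp))
    have h1 := h (↑p) ⟨Int.natCast_nonneg p, by exact_mod_cast hp⟩ (↑q)
      ⟨Int.natCast_nonneg q, by
        rw [PySem.List.pyGetD_natCast, List.getD_eq_getElem _ _ hp]
        exact_mod_cast hq⟩
    rw [PySem.List.pyGetD_map_pyRange_one _ _ _ p _ (by omega),
      PySem.List.pyGetD_map_pyRange_one _ _ _ q _ (by omega),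
      PySem.List.pyGetD_natCast (PySem.List.pyGetD bug (↑p) []),
      PySem.List.pyGetD_natCast bug, List.getD_eq_getElem bug [] hp,
      List.getD_eq_getElem (bug[p]) "" hq] at h1
    simpa [pvCell] using (bug_check_iff _ _).mp h1 hs
  · intro h p hp q hq
    obtain ⟨pn, rfl⟩ : ∃ n : Nat, p = (n : Int) := ⟨p.toNat, (Int.toNat_of_nonneg hp.1).symm⟩
    have hpn : pn < bug.length := by exact_mod_cast hp.2
    rw [PySem.List.pyGetD_natCast bug, List.getD_eq_getElem bug [] hpn] at hq ⊢
    obtain ⟨qn, rfl⟩ : ∃ n : Nat, q = (n : Int) := ⟨q.toNat, (Int.toNat_of_nonneg hq.1).symm⟩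
    have hqn : qn < bug[pn].length := by exact_mod_cast hq.2
    have hqW : qn < (bug.getD 0 []).length :=
      lt_of_lt_of_le hqn (hbug _ (List.getElem_mem hpn))
    rw [PySem.List.pyGetD_map_pyRange_one _ _ _ pn _ (by omega),
      PySem.List.pyGetD_map_pyRange_one _ _ _ qn _ (by omega),
      PySem.List.pyGetD_natCast (bug[pn]), List.getD_eq_getElem (bug[pn]) "" hqn]
    refine (bug_check_iff _ _).mpr (fun hs => ?_)
    have := h ((pn : Int), (qn : Int), bug[pn][qn])
      ((mem_constraints bug _).mpr ⟨pn, hpn, qn, hqn, hs, rfl⟩)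
    simpa [pvCell] using this

-- ===== VERDICT (by name: the statement is the Claim_ definition above) =====
theorem bug_count_test_spec : Claim_equal_bug_count_test := by
  intro bug test _ hpre
  obtain ⟨hb, ht, hcase⟩ := hpre
  unfold Spec_bug_count_test bug_count_test bug_count_test_alt
  simp only [PySem.List.len_eq, PySem.List.pyGetD_zero]
  apply PySem.List.foldl_congr_mem
  intro acc i hi
  apply PySem.List.foldl_congr_mem
  intro acc2 j hj
  rcases hcase with ⟨hbug, -⟩ | hlen | hwid
  · rw [window_eq bug test hbug i j]
  · exfalso; rw [PySem.List.mem_pyRange_one] at hi; omega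
  · exfalso; rw [PySem.List.mem_pyRange_one] at hj; omega
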